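-- pv_equiv track=rewrite | github.com/gmweinberg/shapely | rideshare.py | rideshare_vals
-- ===== SOURCE A (Python) =====
-- def rideshare_vals(perm):
--     sofar = 0
--     vals = {}
--     for player in perm:
--         if player > sofar:
--             vals[player] = player - sofar
--             sofar = player
--         else:
--             vals[player] = 0
--     return vals
-- ===== SOURCE B (Python) =====
-- def rideshare_vals(perm):
--     # pre-pass: running max (seeded with 0) of everything BEFORE each position
--     prior = [0]
--     for p in perm:
--         prior.append(p if p > prior[-1] else prior[-1])
--     # second pass: each player's marginal value over its prior max; later duplicates overwrite
--     return {p: (p - m if p > m else 0) for p, m in zip(perm, prior)}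
-- ===== Notes on version B (the rewrite author's own statement) =====
-- stated objective: alternative
-- what changed: Replaces A's single stateful loop by a prefix-maximum pre-pass followed by a dict comprehension zipping each player with the max seen before it.
import Mathlib
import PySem

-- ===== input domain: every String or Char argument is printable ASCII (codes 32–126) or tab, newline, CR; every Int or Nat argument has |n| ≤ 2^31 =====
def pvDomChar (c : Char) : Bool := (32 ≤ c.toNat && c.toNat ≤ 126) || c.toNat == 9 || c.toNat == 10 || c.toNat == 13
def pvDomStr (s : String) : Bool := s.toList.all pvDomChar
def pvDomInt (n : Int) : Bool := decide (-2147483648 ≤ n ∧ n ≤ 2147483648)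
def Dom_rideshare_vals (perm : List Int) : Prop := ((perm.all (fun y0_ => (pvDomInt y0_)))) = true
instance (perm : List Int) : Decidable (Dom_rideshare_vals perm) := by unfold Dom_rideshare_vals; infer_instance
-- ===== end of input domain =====

-- B replaces A's single stateful loop by a prefix-max pre-pass plus a zipped dict comprehension (alternative decomposition, same cost).

-- ===== PORT A =====
def rideshare_vals (perm : List Int) : List (Int × Int) :=
  (perm.foldl
    (fun (st : Int × PySem.Dict Int Int) player =>
      if player > st.1 then (player, st.2.insert player (player - st.1))
      else (st.1, st.2.insert player 0))
    (0, PySem.Dict.empty)).2.items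

-- ===== PORT B =====
-- prior maxima: value of `prior[i]` zipped against perm[i] (the append-and-zip of Source B)
def pvPriorMax : List Int → Int → List Int
  | [], _ => []
  | p :: rest, m => m :: pvPriorMax rest (if p > m then p else m)

def rideshare_vals_alt (perm : List Int) : List (Int × Int) :=
  ((perm.zip (pvPriorMax perm 0)).foldl
    (fun (d : PySem.Dict Int Int) pm =>
      d.insert pm.1 (if pm.1 > pm.2 then pm.1 - pm.2 else 0))
    PySem.Dict.empty).items

-- ===== PRECONDITION & SPEC =====
def Spec_rideshare_vals (perm : List Int) (out : List (Int × Int)) : Prop := out = rideshare_vals_alt perm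
instance (perm : List Int) (out : List (Int × Int)) : Decidable (Spec_rideshare_vals perm out) := by unfold Spec_rideshare_vals; infer_instance

-- ===== CLAIM (what is proved, stated in full; the proofs are below) =====
def Claim_equal_rideshare_vals : Prop := ∀ (perm : List Int), Dom_rideshare_vals perm → Spec_rideshare_vals perm (rideshare_vals perm)

-- ===== LEMMAS AND PROOFS =====
theorem foldl_prior_eq (perm : List Int) :
    ∀ (s : Int) (d : PySem.Dict Int Int),
    (perm.foldl
      (fun (st : Int × PySem.Dict Int Int) player =>
        if player > st.1 then (player, st.2.insert player (player - st.1))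
        else (st.1, st.2.insert player 0))
      (s, d)).2
    = (perm.zip (pvPriorMax perm s)).foldl
        (fun (d : PySem.Dict Int Int) pm =>
          d.insert pm.1 (if pm.1 > pm.2 then pm.1 - pm.2 else 0)) d := by
  induction perm with
  | nil => intro s d; rfl
  | cons p rest ih =>
    intro s d
    simp only [pvPriorMax, List.zip_cons_cons, List.foldl_cons]
    by_cases h : p > s
    · simp [h, ih]
    · simp [h, ih]

-- ===== VERDICT (by name: the statement is the Claim_ definition above) =====
theorem rideshare_vals_spec : Claim_equal_rideshare_vals := by
  intro perm _
  unfold Spec_rideshare_vals rideshare_vals rideshare_vals_alt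
  rw [foldl_prior_eq]
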